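-- pv_equiv track=rewrite | github.com/daniel-reich/turbo-robot | eMRXLJLpaSTxZvsKN_2.py | is_ladder_safe
-- ===== SOURCE A (Python) =====
-- def is_ladder_safe(ldr):
--   n = len(ldr[0])
--   if n >= 5:
--     rung = '#'*n
--     not_rung = '#' + ' '*(n-2) + '#'
--     if all(row in [rung,not_rung] for row in ldr):
--       rungs = [i for i in range(len(ldr)) if ldr[i] == rung]
--       gap = [b-a for a, b in zip(rungs,rungs[1:])]
--       return len(set(gap)) == 1 and gap[0] <= 3
--   return False
-- ===== SOURCE B (Python) =====
-- def is_ladder_safe(ldr):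
--     n = len(ldr[0])
--     if n < 5:
--         return False
--     rung = '#' * n
--     rail = '#' + ' ' * (n - 2) + '#'
--     if rung not in ldr:
--         return False
--     s = ldr.index(rung)
--     if rung not in ldr[s + 1:]:
--         return False
--     g = ldr[s + 1:].index(rung) + 1
--     if g > 3:
--         return False
--     e = len(ldr) - 1 - ldr[::-1].index(rung)
--     expected = [rung if s <= i <= e and (i - s) % g == 0 else rail
--                 for i in range(len(ldr))]
--     return ldr == expected
-- ===== Notes on version B (the rewrite author's own statement) =====
-- stated objective: alternative
-- what changed: Instead of A's validate-all-rows / collect-rung-indices / compare-gap-set pipeline, B locates only the first, second and last rung via list.index (on the list, a tail slice, and the reversed list), constructs from them the unique safe ladder of that shape, and tests whole-list equality ldr == expected.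
import Mathlib
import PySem

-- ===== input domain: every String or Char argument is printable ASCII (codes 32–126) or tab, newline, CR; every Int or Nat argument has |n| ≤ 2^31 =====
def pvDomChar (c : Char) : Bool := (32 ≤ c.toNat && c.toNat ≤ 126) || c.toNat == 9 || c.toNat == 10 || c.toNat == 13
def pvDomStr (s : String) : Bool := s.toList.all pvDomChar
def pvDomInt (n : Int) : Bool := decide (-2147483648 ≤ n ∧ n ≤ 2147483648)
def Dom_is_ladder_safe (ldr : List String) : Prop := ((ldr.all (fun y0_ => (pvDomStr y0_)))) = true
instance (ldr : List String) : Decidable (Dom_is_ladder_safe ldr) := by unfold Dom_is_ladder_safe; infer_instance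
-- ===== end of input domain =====

-- B replaces A's validate-all-rows / collect-indices / gap-set pipeline with an
-- index-based construct-and-compare: from the first, second and last rung position
-- it builds the unique safe ladder and tests ldr == expected (objective: alternative).

-- ===== PORT A =====
def is_ladder_safe (ldr : List String) : Bool :=
  match ldr with
  | [] => false  -- Python raises IndexError on ldr[0]; excluded by Pre_
  | first :: _ =>
    let n := first.toList.length
    if 5 ≤ n then
      let rung := String.ofList (List.replicate n '#')
      let notRung := String.ofList ('#' :: (List.replicate (n - 2) ' ' ++ ['#']))
      if ldr.all (fun row => row == rung || row == notRung) then
        let rungs := (List.range ldr.length).filter (fun i => ldr.getD i "" == rung)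
        let gap := (rungs.zip rungs.tail).map (fun p => (p.2 : Int) - (p.1 : Int))
        (decide ((PySem.Set.ofList gap).length = 1)) &&
          (match PySem.List.pyGet? gap 0 with
           | some g => decide (g ≤ 3)
           | none => false)  -- unreachable: len(set(gap)) == 1 forces gap nonempty
      else false
    else false

-- ===== PORT B =====
def is_ladder_safe_alt (ldr : List String) : Bool :=
  match ldr with
  | [] => false  -- Python raises IndexError on ldr[0]; excluded by Pre_
  | first :: _ =>
    let n := first.toList.length
    if n < 5 then false
    else
      let rung := String.ofList (List.replicate n '#')
      let rail := String.ofList ('#' :: (List.replicate (n - 2) ' ' ++ ['#']))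
      if !(ldr.contains rung) then false
      else
        match PySem.List.index? ldr rung with
        | none => false  -- unreachable: membership just checked
        | some s =>
          let tl := PySem.List.slice ldr (some ((s : Int) + 1)) none
          if !(tl.contains rung) then false
          else
            match PySem.List.index? tl rung with
            | none => false  -- unreachable: membership just checked
            | some g0 =>
              let g := g0 + 1
              if 3 < g then false
              else
                match PySem.List.slice? ldr none none (-1) with
                | none => false  -- unreachable: step -1 ≠ 0
                | some rev =>
                  match PySem.List.index? rev rung with
                  | none => false  -- unreachable: rung ∈ ldr
                  | some k =>
                    let e := ldr.length - 1 - k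
                    let expected := (List.range ldr.length).map (fun i =>
                      if s ≤ i ∧ i ≤ e ∧ (i - s) % g = 0 then rung else rail)
                    ldr == expected

-- ===== PRECONDITION & SPEC =====
-- Pre_ excludes only the empty list, on which A (and B) raise IndexError at ldr[0].
def Pre_is_ladder_safe (ldr : List String) : Prop := ldr ≠ []
instance (ldr : List String) : Decidable (Pre_is_ladder_safe ldr) := by unfold Pre_is_ladder_safe; infer_instance
def pvWitness_is_ladder_safe : List String := ["#####", "#   #", "#####"]

def Spec_is_ladder_safe (ldr : List String) (out : Bool) : Prop := out = is_ladder_safe_alt ldr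
instance (ldr : List String) (out : Bool) : Decidable (Spec_is_ladder_safe ldr out) := by unfold Spec_is_ladder_safe; infer_instance

-- ===== CLAIM (what is proved, stated in full; the proofs are below) =====
def Claim_equal_is_ladder_safe : Prop := ∀ (ldr : List String), Dom_is_ladder_safe ldr → Pre_is_ladder_safe ldr → Spec_is_ladder_safe ldr (is_ladder_safe ldr)

-- ===== LEMMAS AND PROOFS =====

-- The shared characterisation both ports are reduced to: the rung rows sit exactly
-- on an arithmetic progression s, s+g, …, s+g*K with 1 ≤ g ≤ 3, K ≥ 1, inside the list,
-- and every other row is the rail.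
def LadderPhi (rows : List String) (rung rail : String) : Prop :=
  ∃ s g K, 1 ≤ g ∧ g ≤ 3 ∧ 1 ≤ K ∧ s + g * K < rows.length ∧
    ∀ i (h : i < rows.length),
      (rows[i] = rung ↔ ∃ k ≤ K, i = s + g * k) ∧ (rows[i] = rung ∨ rows[i] = rail)

-- the two port bodies after the width test, as standalone functions
def ARungs (rows : List String) (rung : String) : List Nat :=
  (List.range rows.length).filter (fun i => rows.getD i "" == rung)

def AGap (rows : List String) (rung : String) : List Int :=
  ((ARungs rows rung).zip (ARungs rows rung).tail).map (fun p => (p.2 : Int) - (p.1 : Int))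

def AInner (rows : List String) (rung rail : String) : Bool :=
  if rows.all (fun row => row == rung || row == rail) then
    (decide ((PySem.Set.ofList (AGap rows rung)).length = 1)) &&
      (match PySem.List.pyGet? (AGap rows rung) 0 with
       | some g => decide (g ≤ 3)
       | none => false)
  else false

def BInner (rows : List String) (rung rail : String) : Bool :=
  if !(rows.contains rung) then false
  else
    match PySem.List.index? rows rung with
    | none => false
    | some s =>
      let tl := PySem.List.slice rows (some ((s : Int) + 1)) none
      if !(tl.contains rung) then false
      else
        match PySem.List.index? tl rung with
        | none => false
        | some g0 =>
          let g := g0 + 1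
          if 3 < g then false
          else
            match PySem.List.slice? rows none none (-1) with
            | none => false
            | some rev =>
              match PySem.List.index? rev rung with
              | none => false
              | some k =>
                let e := rows.length - 1 - k
                let expected := (List.range rows.length).map (fun i =>
                  if s ≤ i ∧ i ≤ e ∧ (i - s) % g = 0 then rung else rail)
                rows == expected

-- arithmetic progression list
def APl (s g len : Nat) : List Nat := (List.range len).map (fun k => s + g * k)

theorem APl_succ (s g len : Nat) : APl s g (len + 1) = s :: APl (s + g) g len := by
  simp only [APl, List.range_succ_eq_map, List.map_cons, List.map_map, Nat.mul_zero, Nat.add_zero]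
  congr 1
  apply List.map_congr_left
  intro k _
  simp [Function.comp, Nat.mul_succ]
  omega

theorem ap_of_gaps (l : List Nat) (a g : Nat)
    (h : (((a :: l).zip l).map (fun p => (p.2 : Int) - (p.1 : Int))).all (· == (g : Int)) = true) :
    a :: l = APl a g (l.length + 1) := by
  induction l generalizing a with
  | nil => simp [APl]
  | cons b t ih =>
    simp only [List.zip_cons_cons, List.map_cons, List.all_cons, Bool.and_eq_true, beq_iff_eq] at h
    have hb : b = a + g := by omega
    have := ih b h.2
    rw [List.length_cons, APl_succ, ← hb, ← this]

theorem ap_gaps (s g K : Nat) :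
    (((APl s g (K + 1)).zip (APl s g (K + 1)).tail).map (fun p => (p.2 : Int) - (p.1 : Int)))
      = List.replicate K (g : Int) := by
  induction K generalizing s with
  | zero => simp [APl]
  | succ K ih =>
    rw [APl_succ s g (K + 1), APl_succ (s + g) g K]
    have := ih (s + g)
    rw [APl_succ (s + g) g K] at this
    simp only [List.tail_cons, List.zip_cons_cons, List.map_cons, List.replicate_succ]
    refine List.cons_eq_cons.mpr ⟨by push_cast; ring, ?_⟩
    simpa using this

theorem mem_APl (s g K i : Nat) : i ∈ APl s g (K + 1) ↔ ∃ k ≤ K, i = s + g * k := by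
  simp only [APl, List.mem_map, List.mem_range]
  constructor
  · rintro ⟨k, hk, rfl⟩; exact ⟨k, by omega, rfl⟩
  · rintro ⟨k, hk, rfl⟩; exact ⟨k, by omega, rfl⟩

theorem APl_pairwise (s g K : Nat) (hg : 1 ≤ g) : (APl s g K).Pairwise (· < ·) := by
  apply List.Pairwise.map
  · intro a b hab
    have : g * a < g * b := (Nat.mul_lt_mul_left (by omega)).mpr hab
    omega
  · exact List.pairwise_lt_range

theorem cond_iff_ap (s g K i : Nat) (hg : 1 ≤ g) :
    (s ≤ i ∧ i ≤ s + g * K ∧ (i - s) % g = 0) ↔ ∃ k ≤ K, i = s + g * k := by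
  constructor
  · rintro ⟨h1, h2, h3⟩
    have hdvd : g ∣ (i - s) := Nat.dvd_of_mod_eq_zero h3
    refine ⟨(i - s) / g, ?_, ?_⟩
    · have hle : g * ((i - s) / g) ≤ g * K := by
        rw [Nat.mul_div_cancel' hdvd]; omega
      exact Nat.le_of_mul_le_mul_left hle (by omega)
    · have := Nat.mul_div_cancel' hdvd
      omega
  · rintro ⟨k, hk, rfl⟩
    refine ⟨by omega, by
      have : g * k ≤ g * K := Nat.mul_le_mul_left g hk
      omega, ?_⟩
    have : s + g * k - s = g * k := by omega
    rw [this, Nat.mul_mod_right]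

-- len(set(l)) == 1 iff the list is nonempty with all elements equal to its head
theorem setLen_one_iff (a : Int) (t : List Int) :
    (PySem.Set.ofList (a :: t)).length = 1 ↔ ∀ x ∈ t, x = a := by
  constructor
  · intro h x hx
    have hmem : x ∈ PySem.Set.ofList (a :: t) :=
      (PySem.Set.mem_ofList _ _).mpr (List.mem_cons_of_mem _ hx)
    have hamem : a ∈ PySem.Set.ofList (a :: t) :=
      (PySem.Set.mem_ofList _ _).mpr List.mem_cons_self
    obtain ⟨y, hy⟩ := List.length_eq_one_iff.mp h
    rw [hy] at hmem hamem
    simp at hmem hamem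
    rw [hmem, hamem]
  · intro h
    have hnd := PySem.Set.nodup_ofList (a :: t)
    have hall : ∀ x ∈ PySem.Set.ofList (a :: t), x = a := by
      intro x hx
      rcases List.mem_cons.mp ((PySem.Set.mem_ofList _ _).mp hx) with h' | h'
      · exact h'
      · exact h x h'
    have ha : a ∈ PySem.Set.ofList (a :: t) :=
      (PySem.Set.mem_ofList _ _).mpr List.mem_cons_self
    cases hS : PySem.Set.ofList (a :: t) with
    | nil => rw [hS] at ha; cases ha
    | cons x s =>
      cases s with
      | nil => simp
      | cons y s' =>
        rw [hS] at hall hnd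
        have hx := hall x (by simp)
        have hy := hall y (by simp)
        subst hx; subst hy
        simp at hnd

-- index? returns s when position s holds v and no earlier position does
theorem index?_eq_first {α : Type} [BEq α] [LawfulBEq α] (xs : List α) (v : α) (s : Nat)
    (hs : s < xs.length) (hv : xs[s] = v)
    (hlt : ∀ j (hj : j < s), xs[j]'(by omega) ≠ v) :
    PySem.List.index? xs v = some s := by
  rw [PySem.List.index?_eq_some_iff]
  refine ⟨xs.take s, xs.drop (s + 1), ?_, by simp [List.length_take]; omega, ?_⟩
  · conv_lhs => rw [← List.take_append_drop s xs]
    rw [List.drop_eq_getElem_cons hs, hv]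
  · intro hmem
    obtain ⟨j, hj, hje⟩ := List.mem_iff_getElem.mp hmem
    have hjs : j < s := by
      have := hj; simp [List.length_take] at this; omega
    rw [List.getElem_take] at hje
    exact hlt j hjs hje

-- the rung and rail rows differ (they differ at character 1 once the width is ≥ 5)
theorem rung_ne_rail (n : Nat) (hn : 5 ≤ n) :
    String.ofList (List.replicate n '#') ≠ String.ofList ('#' :: (List.replicate (n - 2) ' ' ++ ['#'])) := by
  intro h
  have hl : List.replicate n '#' = '#' :: (List.replicate (n - 2) ' ' ++ ['#']) := by
    have := congrArg String.toList h
    simpa using this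
  have h2 := congrArg (fun l => l[1]?) hl
  simp only [List.getElem?_cons_succ, List.getElem?_append, List.length_replicate] at h2
  simp [List.getElem?_replicate, show (1:Nat) < n by omega, show (0:Nat) < n - 2 by omega] at h2

-- the rung-index list of A is exactly the membership-characterised filter
theorem mem_rungs (rows : List String) (rung : String) (i : Nat) :
    i ∈ (List.range rows.length).filter (fun j => rows.getD j "" == rung) ↔
      ∃ h : i < rows.length, rows[i] = rung := by
  simp only [List.mem_filter, List.mem_range, beq_iff_eq]
  constructor
  · rintro ⟨h1, h2⟩
    exact ⟨h1, by rwa [List.getD_eq_getElem _ _ h1] at h2⟩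
  · rintro ⟨h1, h2⟩
    exact ⟨h1, by rwa [List.getD_eq_getElem _ _ h1]⟩

theorem A_iff (rows : List String) (rung rail : String) (_hne : rung ≠ rail) :
    AInner rows rung rail = true ↔ LadderPhi rows rung rail := by
  have hRp : ((List.range rows.length).filter (fun i => rows.getD i "" == rung)).Pairwise (· < ·) :=
    List.Pairwise.filter _ List.pairwise_lt_range
  unfold AInner
  constructor
  · intro hA
    by_cases hall : rows.all (fun row => row == rung || row == rail) = true
    case neg => rw [if_neg hall] at hA; exact absurd hA (by simp)
    rw [if_pos hall] at hA
    cases hRe : (List.range rows.length).filter (fun i => rows.getD i "" == rung) with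
    | nil => rw [AGap, ARungs, hRe] at hA; simp [PySem.Set.ofList] at hA
    | cons r0 R1 =>
      cases R1 with
      | nil => rw [AGap, ARungs, hRe] at hA; simp [PySem.Set.ofList] at hA
      | cons r1 rs =>
        rw [AGap, ARungs, hRe] at hA
        rw [hRe] at hRp
        simp only [List.tail_cons, List.zip_cons_cons, List.map_cons, Bool.and_eq_true] at hA
        obtain ⟨h1, h2⟩ := hA
        have hget : PySem.List.pyGet?
            (((r1 : Int) - r0) :: (((r1 :: rs).zip rs).map (fun p => (p.2 : Int) - p.1))) 0
            = some ((r1 : Int) - r0) := by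
          simp [PySem.List.pyGet?, PySem.List.pyIdx?]
        rw [hget] at h2
        have hle3 : (r1 : Int) - r0 ≤ 3 := of_decide_eq_true h2
        have hallg : ∀ x ∈ ((r1 :: rs).zip rs).map (fun p => (p.2 : Int) - p.1), x = (r1 : Int) - r0 :=
          (setLen_one_iff _ _).mp (of_decide_eq_true h1)
        have hr01 : r0 < r1 := (List.pairwise_cons.mp hRp).1 r1 List.mem_cons_self
        have hgcast : (((r1 - r0 : Nat) : Int)) = (r1 : Int) - r0 := by omega
        have hap : r0 :: r1 :: rs = APl r0 (r1 - r0) (rs.length + 1 + 1) := by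
          apply ap_of_gaps (r1 :: rs) r0 (r1 - r0)
          rw [List.all_eq_true]
          intro x hx
          simp only [List.zip_cons_cons, List.map_cons, List.mem_cons] at hx
          rcases hx with rfl | hx
          · simp [hgcast]
          · simp [hallg x hx, hgcast]
        refine ⟨r0, r1 - r0, rs.length + 1, by omega, by omega, by omega, ?_, ?_⟩
        · have hmem : r0 + (r1 - r0) * (rs.length + 1) ∈ APl r0 (r1 - r0) (rs.length + 1 + 1) :=
            (mem_APl _ _ _ _).mpr ⟨rs.length + 1, le_refl _, rfl⟩
          rw [← hap] at hmem
          obtain ⟨hh, _⟩ := (mem_rungs rows rung _).mp (hRe ▸ hmem)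
          exact hh
        · intro i h
          constructor
          · have hiff : rows[i] = rung ↔
                i ∈ (List.range rows.length).filter (fun j => rows.getD j "" == rung) := by
              rw [mem_rungs]
              exact ⟨fun hh => ⟨h, hh⟩, fun ⟨_, hh⟩ => hh⟩
            rw [hiff, hRe, hap, mem_APl]
          · have := List.all_eq_true.mp hall rows[i] (List.getElem_mem h)
            simpa using this
  · rintro ⟨s, g, K, hg1, hg3, hK1, hbound, hchar⟩
    have hall : rows.all (fun row => row == rung || row == rail) = true := by
      rw [List.all_eq_true]
      intro row hrow
      obtain ⟨i, h, rfl⟩ := List.mem_iff_getElem.mp hrow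
      rcases (hchar i h).2 with h' | h' <;> simp [h']
    rw [if_pos hall]
    have hReq : (List.range rows.length).filter (fun i => rows.getD i "" == rung)
        = APl s g (K + 1) := by
      have hap := APl_pairwise s g (K + 1) hg1
      have hnd1 := hRp.imp (fun hab => Nat.ne_of_lt hab)
      have hnd2 := hap.imp (fun hab => Nat.ne_of_lt hab)
      have hmem : ∀ i, i ∈ (List.range rows.length).filter (fun j => rows.getD j "" == rung)
          ↔ i ∈ APl s g (K + 1) := by
        intro i
        rw [mem_rungs, mem_APl]
        constructor
        · rintro ⟨h, hi⟩
          exact (hchar i h).1.mp hi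
        · rintro ⟨k, hk, rfl⟩
          have hmul : g * k ≤ g * K := Nat.mul_le_mul_left g hk
          have hlt : s + g * k < rows.length := by omega
          exact ⟨hlt, (hchar _ hlt).1.mpr ⟨k, hk, rfl⟩⟩
      exact ((List.perm_ext_iff_of_nodup hnd1 hnd2).mpr hmem).eq_of_pairwise
        (fun a b _ _ hab hba => by omega) hRp hap
    obtain ⟨K', rfl⟩ : ∃ K', K = K' + 1 := ⟨K - 1, by omega⟩
    have hGap : AGap rows rung = List.replicate (K' + 1) (g : Int) := by
      rw [AGap, ARungs, hReq, ap_gaps]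
    rw [hGap, List.replicate_succ]
    have hset : (PySem.Set.ofList ((g : Int) :: List.replicate K' (g : Int))).length = 1 :=
      (setLen_one_iff _ _).mpr (fun x hx => List.eq_of_mem_replicate hx)
    have hget : PySem.List.pyGet? ((g : Int) :: List.replicate K' (g : Int)) 0 = some (g : Int) := by
      simp [PySem.List.pyGet?, PySem.List.pyIdx?]
    rw [hget]
    simp [hset, show ((g : Nat) : Int) ≤ 3 by omega]

theorem B_iff (rows : List String) (rung rail : String) (hne : rung ≠ rail) :
    BInner rows rung rail = true ↔ LadderPhi rows rung rail := by
  have hslice : ∀ s : Nat, PySem.List.slice rows (some ((s : Int) + 1)) none = rows.drop (s + 1) := by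
    intro s
    have hc : ((s : Int) + 1) = ((s + 1 : Nat) : Int) := by push_cast; ring
    rw [hc, PySem.List.slice_from_natCast]
  unfold BInner
  constructor
  · intro hB
    cases hcon : rows.contains rung with
    | false => rw [hcon] at hB; simp at hB
    | true =>
    rw [hcon, if_neg (by simp)] at hB
    cases hidx : PySem.List.index? rows rung with
    | none => simp only [hidx] at hB; exact absurd hB (by simp)
    | some s =>
    simp only [hidx, hslice s] at hB
    cases hcon2 : (rows.drop (s + 1)).contains rung with
    | false => simp only [hcon2] at hB; simp at hB
    | true =>
    rw [hcon2, if_neg (by simp)] at hB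
    cases hidx2 : PySem.List.index? (rows.drop (s + 1)) rung with
    | none => simp only [hidx2] at hB; exact absurd hB (by simp)
    | some g0 =>
    simp only [hidx2] at hB
    by_cases hgle : 3 < g0 + 1
    · rw [if_pos hgle] at hB; exact absurd hB (by simp)
    rw [if_neg hgle, PySem.List.slice?_none_none_neg_one] at hB
    cases hidx3 : PySem.List.index? rows.reverse rung with
    | none => simp only [hidx3] at hB; exact absurd hB (by simp)
    | some k =>
    simp only [hidx3] at hB
    have heq : rows = (List.range rows.length).map (fun i =>
        if s ≤ i ∧ i ≤ rows.length - 1 - k ∧ (i - s) % (g0 + 1) = 0 then rung else rail) :=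
      eq_of_beq hB
    obtain ⟨hs_lt, hsv, hsfirst⟩ := PySem.List.getElem_of_index?_eq_some hidx
    obtain ⟨hg0_lt, hg0v, hg0first⟩ := PySem.List.getElem_of_index?_eq_some hidx2
    obtain ⟨hk_lt, hkv, hkfirst⟩ := PySem.List.getElem_of_index?_eq_some hidx3
    have hkm : k < rows.length := by simpa using hk_lt
    have hchar0 : ∀ i (h : i < rows.length),
        rows[i] = if s ≤ i ∧ i ≤ rows.length - 1 - k ∧ (i - s) % (g0 + 1) = 0
          then rung else rail := by
      intro i h
      rw [List.getElem_of_eq heq h, List.getElem_map, List.getElem_range]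
    have hrowe : rows[rows.length - 1 - k]'(by omega) = rung := by
      rw [List.getElem_reverse] at hkv
      exact hkv
    have hnolater : ∀ j (hj : j < rows.length), rows.length - 1 - k < j → rows[j] ≠ rung := by
      intro j hj hej
      have hjk : rows.length - 1 - j < k := by omega
      have hx := hkfirst (rows.length - 1 - j) hjk
      rw [List.getElem_reverse] at hx
      simpa [show rows.length - 1 - (rows.length - 1 - j) = j by omega] using hx
    have hsglt : s + (g0 + 1) < rows.length := by
      have := hg0_lt
      simp only [List.length_drop] at this
      omega
    have hsg_rung : rows[s + (g0 + 1)]'hsglt = rung := by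
      rw [List.getElem_drop] at hg0v
      simpa [show s + 1 + g0 = s + (g0 + 1) by omega] using hg0v
    have hsge : s + (g0 + 1) ≤ rows.length - 1 - k := by
      by_contra hgt
      exact hnolater (s + (g0 + 1)) hsglt (by omega) hsg_rung
    have hce : ((rows.length - 1 - k) - s) % (g0 + 1) = 0 := by
      by_contra hcc
      have hc := hchar0 (rows.length - 1 - k) (by omega)
      rw [if_neg (by intro hc3; exact hcc hc3.2.2)] at hc
      exact hne (hrowe.symm.trans hc)
    have hdvd : (g0 + 1) ∣ ((rows.length - 1 - k) - s) := Nat.dvd_of_mod_eq_zero hce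
    obtain ⟨K, hKdef⟩ := hdvd
    have heK : rows.length - 1 - k = s + (g0 + 1) * K := by omega
    have hK1 : 1 ≤ K := by
      rcases Nat.eq_zero_or_pos K with h0 | h0
      · rw [h0, Nat.mul_zero] at heK; omega
      · exact h0
    refine ⟨s, g0 + 1, K, by omega, by omega, hK1, by omega, ?_⟩
    intro i h
    have hcn := hchar0 i h
    constructor
    · constructor
      · intro hir
        have hcond : s ≤ i ∧ i ≤ rows.length - 1 - k ∧ (i - s) % (g0 + 1) = 0 := by
          by_contra hcc
          rw [if_neg hcc] at hcn
          exact hne (hir.symm.trans hcn)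
        exact (cond_iff_ap s (g0 + 1) K i (by omega)).mp ⟨hcond.1, by omega, hcond.2.2⟩
      · intro hex
        have hcond := (cond_iff_ap s (g0 + 1) K i (by omega)).mpr hex
        rw [hcn, if_pos ⟨hcond.1, by omega, hcond.2.2⟩]
    · rw [hcn]
      split
      · exact Or.inl rfl
      · exact Or.inr rfl
  · rintro ⟨s, g, K, hg1, hg3, hK1, hbound, hchar⟩
    obtain ⟨E, hE⟩ : ∃ E, s + g * K = E := ⟨_, rfl⟩
    obtain ⟨G1, hG1⟩ : ∃ G1, g * 1 = G1 := ⟨_, rfl⟩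
    have hG1' : G1 = g := by omega
    have hsE : s ≤ E ∧ s + g ≤ E := by
      have h1 : g * 1 ≤ g * K := Nat.mul_le_mul_left g hK1
      omega
    have hEm : E < rows.length := by omega
    have hs_lt : s < rows.length := by omega
    have hrs : rows[s]'hs_lt = rung :=
      (hchar s hs_lt).1.mpr ⟨0, by omega, by simp⟩
    have hfirst : ∀ j (hj : j < s), rows[j]'(by omega) ≠ rung := by
      intro j hj hcon
      obtain ⟨kk, hkk, hkeq⟩ := (hchar j (by omega)).1.mp hcon
      have : s ≤ s + g * kk := Nat.le_add_right s (g * kk)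
      omega
    have hidx : PySem.List.index? rows rung = some s :=
      index?_eq_first _ _ _ hs_lt hrs hfirst
    have hcon : rows.contains rung = true := by
      simp [List.mem_iff_getElem.mpr ⟨s, hs_lt, hrs⟩]
    have hsg_lt : s + g < rows.length := by omega
    have hsg_rung : rows[s + g]'hsg_lt = rung :=
      (hchar (s + g) hsg_lt).1.mpr ⟨1, hK1, by omega⟩
    have hg1_lt : g - 1 < (rows.drop (s + 1)).length := by simp; omega
    have hdropg : (rows.drop (s + 1))[g - 1]'hg1_lt = rung := by
      rw [List.getElem_drop]
      simpa [show s + 1 + (g - 1) = s + g by omega] using hsg_rung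
    have hdropfirst : ∀ j (hj : j < g - 1), (rows.drop (s + 1))[j]'(by omega) ≠ rung := by
      intro j hj hcc
      rw [List.getElem_drop] at hcc
      obtain ⟨kk, hkk, hkeq⟩ := (hchar (s + 1 + j) (by omega)).1.mp hcc
      rcases Nat.eq_zero_or_pos kk with rfl | hkp
      · rw [Nat.mul_zero] at hkeq; omega
      · have hgk : g ≤ g * kk := Nat.le_mul_of_pos_right g hkp
        obtain ⟨T, hT⟩ : ∃ T, g * kk = T := ⟨_, rfl⟩
        omega
    have hidx2 : PySem.List.index? (rows.drop (s + 1)) rung = some (g - 1) :=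
      index?_eq_first _ _ _ hg1_lt hdropg hdropfirst
    have hcon2 : (rows.drop (s + 1)).contains rung = true := by
      simp [List.mem_iff_getElem.mpr ⟨g - 1, hg1_lt, hdropg⟩]
    have hrE : rows[E]'hEm = rung :=
      (hchar E hEm).1.mpr ⟨K, le_refl K, hE.symm⟩
    have hkrev_lt : rows.length - 1 - E < rows.reverse.length := by simp; omega
    have hrevval : rows.reverse[rows.length - 1 - E]'hkrev_lt = rung := by
      rw [List.getElem_reverse]
      simpa [show rows.length - 1 - (rows.length - 1 - E) = E by omega] using hrE
    have hrevfirst : ∀ j (hj : j < rows.length - 1 - E),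
        rows.reverse[j]'(by omega) ≠ rung := by
      intro j hj hcc
      rw [List.getElem_reverse] at hcc
      obtain ⟨kk, hkk, hkeq⟩ := (hchar (rows.length - 1 - j) (by omega)).1.mp hcc
      have hgk : g * kk ≤ g * K := Nat.mul_le_mul_left g hkk
      obtain ⟨T, hT⟩ : ∃ T, g * kk = T := ⟨_, rfl⟩
      omega
    have hidx3 : PySem.List.index? rows.reverse rung = some (rows.length - 1 - E) :=
      index?_eq_first _ _ _ hkrev_lt hrevval hrevfirst
    rw [hcon, if_neg (by simp)]
    simp only [hidx, hslice s]
    rw [hcon2, if_neg (by simp)]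
    simp only [hidx2]
    rw [if_neg (show ¬ 3 < (g - 1) + 1 by omega)]
    rw [PySem.List.slice?_none_none_neg_one]
    simp only [hidx3]
    rw [show rows.length - 1 - (rows.length - 1 - E) = E by omega,
      show (g - 1) + 1 = g by omega]
    have hexp : rows = (List.range rows.length).map (fun i =>
        if s ≤ i ∧ i ≤ E ∧ (i - s) % g = 0 then rung else rail) := by
      apply List.ext_getElem (by simp)
      intro i h1 h2
      rw [List.getElem_map, List.getElem_range]
      by_cases hc : s ≤ i ∧ i ≤ E ∧ (i - s) % g = 0
      · rw [if_pos hc]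
        exact (hchar i h1).1.mpr
          ((cond_iff_ap s g K i hg1).mp ⟨hc.1, by omega, hc.2.2⟩)
      · rw [if_neg hc]
        rcases (hchar i h1).2 with hr | hr
        · exfalso
          obtain ⟨kk, hkk, hkeq⟩ := (hchar i h1).1.mp hr
          have hcond := (cond_iff_ap s g K i hg1).mpr ⟨kk, hkk, hkeq⟩
          exact hc ⟨hcond.1, by omega, hcond.2.2⟩
        · exact hr
    exact beq_iff_eq.mpr hexp

-- ===== VERDICT (by name: the statement is the Claim_ definition above) =====
theorem is_ladder_safe_spec : Claim_equal_is_ladder_safe := by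
  intro ldr _hdom hpre
  unfold Spec_is_ladder_safe
  cases ldr with
  | nil => exact absurd rfl hpre
  | cons first rest =>
    have hA : is_ladder_safe (first :: rest) =
        (if 5 ≤ first.toList.length then
          AInner (first :: rest) (String.ofList (List.replicate first.toList.length '#'))
            (String.ofList ('#' :: (List.replicate (first.toList.length - 2) ' ' ++ ['#'])))
        else false) := rfl
    have hB : is_ladder_safe_alt (first :: rest) =
        (if first.toList.length < 5 then false
         else BInner (first :: rest) (String.ofList (List.replicate first.toList.length '#'))
            (String.ofList ('#' :: (List.replicate (first.toList.length - 2) ' ' ++ ['#'])))) := rfl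
    rw [hA, hB]
    by_cases h5 : 5 ≤ first.toList.length
    · rw [if_pos h5, if_neg (by omega)]
      rw [Bool.eq_iff_iff, A_iff _ _ _ (rung_ne_rail _ h5), B_iff _ _ _ (rung_ne_rail _ h5)]
    · rw [if_neg h5, if_pos (by omega)]
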